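-- pv_equiv track=rewrite | github.com/hgs1217/Palmprint-Segmentation | cv_segment/main.py | search_valley
-- ===== SOURCE A (Python) =====
-- def search_valley(pxs):
--     zeros, nonzs = 0, 0
--     regions = []
--     for i in range(len(pxs)):
--         if pxs[i] == 0:
--             if zeros == 0:
--                 if nonzs >= 5:
--                     regions.append([1, i-nonzs, i-1])
--                 nonzs = 0
--             zeros += 1
--         else:
--             if nonzs == 0:
--                 if zeros >= 5:
--                     regions.append([0, i - zeros, i - 1])
--                 zeros = 0
--             nonzs += 1
--     if nonzs >= 5:
--         regions.append([1, len(pxs) - nonzs, len(pxs) - 1])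
--     elif zeros >= 5:
--         regions.append([0, len(pxs) - zeros, len(pxs) - 1])
--
--     valids = [r[1:] for r in list(filter(lambda x: x[0] == 1, regions))]
--     return valids
-- ===== SOURCE B (Python) =====
-- from itertools import groupby
--
--
-- def search_valley(pxs):
--     valids = []
--     i = 0
--     for nonzero, grp in groupby(pxs, key=lambda px: px != 0):
--         n = sum(1 for _ in grp)
--         if nonzero and n >= 5:
--             valids.append([i, i + n - 1])
--         i += n
--     return valids
-- ===== Notes on version B (the rewrite author's own statement) =====
-- stated objective: simpler
-- what changed: Replaces A's interleaved two-counter state machine (which also records zero-runs only to filter them out, plus an end-of-list fixup and a post-pass filter/slice) with a groupby pass over maximal runs followed by a single emit of nonzero runs of length >= 5.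
import Mathlib
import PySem

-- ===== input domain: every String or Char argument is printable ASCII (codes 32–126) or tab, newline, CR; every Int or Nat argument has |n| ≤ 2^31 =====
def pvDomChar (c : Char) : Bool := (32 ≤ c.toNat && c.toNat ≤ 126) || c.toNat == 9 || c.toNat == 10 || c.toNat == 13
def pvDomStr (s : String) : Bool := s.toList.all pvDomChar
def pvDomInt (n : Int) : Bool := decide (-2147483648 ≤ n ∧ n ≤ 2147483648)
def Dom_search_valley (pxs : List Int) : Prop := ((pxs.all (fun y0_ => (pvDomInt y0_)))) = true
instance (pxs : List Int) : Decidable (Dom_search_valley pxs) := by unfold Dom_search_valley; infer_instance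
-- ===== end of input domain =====

-- B replaces A's interleaved two-counter state machine by a groupby-into-runs pass plus one
-- emit pass over the nonzero runs (objective: simpler); return values proved equal on all inputs.

-- ===== PORT A =====
-- Python's `for i in range(len(pxs)): ... pxs[i] ...` is ported as structural recursion over the
-- list carrying the index i (the element visited at index i is exactly pxs[i], always in range).
def searchValleyLoop : List Int → Int → Int → Int → List (List Int) → Int × Int × List (List Int)
  | [], _, zeros, nonzs, regions => (zeros, nonzs, regions)
  | px :: rest, i, zeros, nonzs, regions =>
    if px = 0 then
      if zeros = 0 then
        let regions' := if nonzs ≥ 5 then regions ++ [[1, i - nonzs, i - 1]] else regions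
        searchValleyLoop rest (i + 1) (zeros + 1) 0 regions'
      else
        searchValleyLoop rest (i + 1) (zeros + 1) nonzs regions
    else
      if nonzs = 0 then
        let regions' := if zeros ≥ 5 then regions ++ [[0, i - zeros, i - 1]] else regions
        searchValleyLoop rest (i + 1) 0 (nonzs + 1) regions'
      else
        searchValleyLoop rest (i + 1) zeros (nonzs + 1) regions

def search_valley (pxs : List Int) : List (List Int) :=
  let st := searchValleyLoop pxs 0 0 0 []
  let zeros := st.1
  let nonzs := st.2.1
  let regions := st.2.2
  let n : Int := (pxs.length : Int)
  let regions2 :=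
    if nonzs ≥ 5 then regions ++ [[1, n - nonzs, n - 1]]
    else if zeros ≥ 5 then regions ++ [[0, n - zeros, n - 1]]
    else regions
  (regions2.filter (fun r => PySem.List.pyGet? r 0 == some 1)).map
    (fun r => PySem.List.slice r (some 1) none)

-- ===== PORT B =====
-- itertools.groupby(pxs, key=lambda px: px != 0), each group reduced to (key, length):
def groupsAux : List Int → Bool → Nat → List (Bool × Nat)
  | [], k, n => [(k, n)]
  | px :: rest, k, n =>
    if decide (px ≠ 0) = k then groupsAux rest k (n + 1)
    else (k, n) :: groupsAux rest (decide (px ≠ 0)) 1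

def groups : List Int → List (Bool × Nat)
  | [] => []
  | px :: rest => groupsAux rest (decide (px ≠ 0)) 1

-- the `for nonzero, grp in groupby(...)` loop with state (i, valids):
def bcollect : List (Bool × Nat) → Int → List (List Int) → List (List Int)
  | [], _, valids => valids
  | (nonzero, n) :: gs, i, valids =>
    bcollect gs (i + n)
      (if nonzero ∧ 5 ≤ n then valids ++ [[i, i + (n : Int) - 1]] else valids)

def search_valley_alt (pxs : List Int) : List (List Int) :=
  bcollect (groups pxs) 0 []

-- ===== PRECONDITION & SPEC =====
def Spec_search_valley (pxs : List Int) (out : List (List Int)) : Prop := out = search_valley_alt pxs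
instance (pxs : List Int) (out : List (List Int)) : Decidable (Spec_search_valley pxs out) := by unfold Spec_search_valley; infer_instance

-- ===== CLAIM (what is proved, stated in full; the proofs are below) =====
def Claim_equal_search_valley : Prop := ∀ (pxs : List Int), Dom_search_valley pxs → Spec_search_valley pxs (search_valley pxs)

-- ===== LEMMAS AND PROOFS =====

-- A's post-loop processing: end-of-list append, then the filter/slice comprehension.
def svFinish (n : Int) (st : Int × Int × List (List Int)) : List (List Int) :=
  let regions2 :=
    if st.2.1 ≥ 5 then st.2.2 ++ [[1, n - st.2.1, n - 1]]
    else if st.1 ≥ 5 then st.2.2 ++ [[0, n - st.1, n - 1]]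
    else st.2.2
  (regions2.filter (fun r => PySem.List.pyGet? r 0 == some 1)).map
    (fun r => PySem.List.slice r (some 1) none)

def svMap (rs : List (List Int)) : List (List Int) :=
  (rs.filter (fun r => PySem.List.pyGet? r 0 == some 1)).map
    (fun r => PySem.List.slice r (some 1) none)

theorem svMap_append (xs ys : List (List Int)) : svMap (xs ++ ys) = svMap xs ++ svMap ys := by
  simp [svMap, List.filter_append]

theorem svMap_one (s e : Int) : svMap [[1, s, e]] = [[s, e]] := by
  simp [svMap, PySem.List.pyGet?, PySem.List.pyIdx?, PySem.List.slice_from_one]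

theorem svMap_zero (s e : Int) : svMap [[0, s, e]] = [] := by
  simp [svMap, PySem.List.pyGet?, PySem.List.pyIdx?]

theorem bcollect_acc (gs : List (Bool × Nat)) (i : Int) (v : List (List Int)) :
    bcollect gs i v = v ++ bcollect gs i [] := by
  induction gs generalizing i v with
  | nil => simp [bcollect]
  | cons g gs ih =>
    obtain ⟨k, n⟩ := g
    simp only [bcollect]
    rw [ih, ih (v := if k ∧ 5 ≤ n then [] ++ [[i, i + (n : Int) - 1]] else [])]
    split_ifs <;> simp

theorem sv_main (rest : List Int) (i : Int) (m : Nat) (k : Bool) (acc : List (List Int))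
    (hm : 1 ≤ m) :
    svMap ((fun st =>
        if st.2.1 ≥ 5 then st.2.2 ++ [[1, (i + rest.length) - st.2.1, (i + rest.length) - 1]]
        else if st.1 ≥ 5 then st.2.2 ++ [[0, (i + rest.length) - st.1, (i + rest.length) - 1]]
        else st.2.2)
      (searchValleyLoop rest i (cond k 0 (m : Int)) (cond k (m : Int) 0) acc))
    = svMap acc ++ bcollect (groupsAux rest k m) (i - m) [] := by
  induction rest generalizing i m k acc with
  | nil =>
    have h05 : ¬ ((0 : Int) ≥ 5) := by norm_num
    cases k with
    | true =>
      simp only [searchValleyLoop, Bool.cond_true, groupsAux, bcollect, List.length_nil,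
        Nat.cast_zero, add_zero]
      by_cases h5 : 5 ≤ m
      · have h5' : ((m : Int)) ≥ 5 := by exact_mod_cast h5
        rw [if_pos h5', svMap_append, svMap_one]
        simp only [true_and, if_pos h5, List.nil_append]
        have e1 : i - (m : Int) + (m : Nat) - 1 = i - 1 := by ring
        rw [e1]
      · have h5' : ¬ ((m : Int) ≥ 5) := fun h => h5 (by exact_mod_cast h)
        rw [if_neg h5', if_neg h05]
        simp [h5]
    | false =>
      simp only [searchValleyLoop, Bool.cond_false, groupsAux, bcollect, List.length_nil,
        Nat.cast_zero, add_zero]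
      rw [if_neg h05]
      by_cases h5 : 5 ≤ m
      · have h5' : ((m : Int)) ≥ 5 := by exact_mod_cast h5
        rw [if_pos h5', svMap_append, svMap_zero]
        simp [h5]
      · have h5' : ¬ ((m : Int) ≥ 5) := fun h => h5 (by exact_mod_cast h)
        rw [if_neg h5']
        simp [h5]
  | cons px rest ih =>
    have hlen : i + (((px :: rest).length : Nat) : Int) = (i + 1) + (rest.length : Int) := by
      push_cast [List.length_cons]; ring
    have hm0 : ¬ ((m : Int) = 0) := by intro h; omega
    by_cases hpx : px = 0
    · have hk : decide (px ≠ 0) = false := by simp [hpx]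
      cases k with
      | false =>
        -- zero run continues
        simp only [searchValleyLoop, Bool.cond_false, if_pos hpx, if_neg hm0]
        rw [hlen]
        have step := ih (i + 1) (m + 1) false acc (by omega)
        simp only [Bool.cond_false, Nat.cast_add, Nat.cast_one] at step
        rw [step]
        simp only [groupsAux, hk]
        have e1 : i + 1 - ((m : Int) + 1) = i - m := by ring
        rw [e1]
        simp
      | true =>
        -- nonzero run of length m ends at index i
        simp only [searchValleyLoop, Bool.cond_true, if_pos hpx]
        simp only [if_true, zero_add]
        rw [hlen]
        have step := ih (i + 1) 1 false
          (if (m : Int) ≥ 5 then acc ++ [[1, i - m, i - 1]] else acc) (le_refl 1)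
        simp only [Bool.cond_false, Nat.cast_one] at step
        rw [step]
        simp only [groupsAux, hk, Bool.false_eq_true, if_false, bcollect]
        rw [bcollect_acc]
        have e1 : i - (m : Int) + (m : Nat) = i := by ring
        have e2 : i + 1 - (1 : Int) = i := by ring
        rw [e1, e2]
        by_cases h5 : 5 ≤ m
        · have h5' : ((m : Int)) ≥ 5 := by exact_mod_cast h5
          rw [if_pos h5', svMap_append, svMap_one, if_pos (by exact ⟨trivial, h5⟩)]
          rw [bcollect_acc (groupsAux rest false 1) i ([] ++ [[i - (m : Int), i - 1]])]
          simp [List.append_assoc]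
        · have h5' : ¬ ((m : Int) ≥ 5) := fun h => h5 (by exact_mod_cast h)
          rw [if_neg h5', if_neg (by simp [h5])]
          simp
    · have hk : decide (px ≠ 0) = true := by simp [hpx]
      cases k with
      | true =>
        -- nonzero run continues
        simp only [searchValleyLoop, Bool.cond_true, if_neg hpx, if_neg hm0]
        rw [hlen]
        have step := ih (i + 1) (m + 1) true acc (by omega)
        simp only [Bool.cond_true, Nat.cast_add, Nat.cast_one] at step
        rw [step]
        simp only [groupsAux, hk]
        have e1 : i + 1 - ((m : Int) + 1) = i - m := by ring
        rw [e1]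
        simp
      | false =>
        -- zero run of length m ends at index i
        simp only [searchValleyLoop, Bool.cond_false, if_neg hpx]
        simp only [if_true, zero_add]
        rw [hlen]
        have step := ih (i + 1) 1 true
          (if (m : Int) ≥ 5 then acc ++ [[0, i - m, i - 1]] else acc) (le_refl 1)
        simp only [Bool.cond_true, Nat.cast_one] at step
        rw [step]
        simp only [groupsAux, hk, Bool.true_eq_false, if_false, bcollect]
        rw [bcollect_acc]
        have e1 : i - (m : Int) + (m : Nat) = i := by ring
        have e2 : i + 1 - (1 : Int) = i := by ring
        rw [e1, e2]
        rw [if_neg (by simp : ¬ (false = true ∧ 5 ≤ m))]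
        by_cases h5 : 5 ≤ m
        · have h5' : ((m : Int)) ≥ 5 := by exact_mod_cast h5
          rw [if_pos h5', svMap_append, svMap_zero]
          simp
        · have h5' : ¬ ((m : Int) ≥ 5) := fun h => h5 (by exact_mod_cast h)
          rw [if_neg h5']
          simp

-- ===== VERDICT (by name: the statement is the Claim_ definition above) =====
theorem search_valley_spec : Claim_equal_search_valley := by
  intro pxs _
  show search_valley pxs = search_valley_alt pxs
  have hfin : ∀ (qxs : List Int), search_valley qxs
      = svMap ((fun st =>
          if st.2.1 ≥ 5 then st.2.2 ++ [[1, ((qxs.length : Nat) : Int) - st.2.1, ((qxs.length : Nat) : Int) - 1]]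
          else if st.1 ≥ 5 then st.2.2 ++ [[0, ((qxs.length : Nat) : Int) - st.1, ((qxs.length : Nat) : Int) - 1]]
          else st.2.2)
        (searchValleyLoop qxs 0 0 0 [])) := fun qxs => rfl
  cases pxs with
  | nil => decide
  | cons px rest =>
    rw [hfin]
    have hlen : (((px :: rest).length : Nat) : Int) = 1 + (rest.length : Int) := by
      push_cast [List.length_cons]; ring
    have h05 : ¬ ((0 : Int) ≥ 5) := by norm_num
    by_cases hpx : px = 0
    · have hk : decide (px ≠ 0) = false := by simp [hpx]
      simp only [searchValleyLoop, if_pos hpx, if_neg h05, hlen]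
      simp only [if_true, zero_add]
      have step := sv_main rest 1 1 false [] (le_refl 1)
      simp only [Bool.cond_false, Nat.cast_one] at step
      rw [step]
      simp [search_valley_alt, groups, hk, svMap]
    · have hk : decide (px ≠ 0) = true := by simp [hpx]
      simp only [searchValleyLoop, if_neg hpx, if_neg h05, hlen]
      simp only [if_true, zero_add]
      have step := sv_main rest 1 1 true [] (le_refl 1)
      simp only [Bool.cond_true, Nat.cast_one] at step
      rw [step]
      simp [search_valley_alt, groups, hk, svMap]
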